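-- pv_equiv track=rewrite | github.com/Felinus-Lee/Felinus-Lee.github.io | 图解Python数据结构与算法/第四章/邻接矩阵.py | build_adj_matrix
-- ===== SOURCE A (Python) =====
-- def build_adj_matrix(array):
--     n = len(array)
--     adj_matrix = [[0] * n for _ in range(n)]
--
--     for i in range(n):
--         left_child = 2 * i + 1
--         right_child = 2 * i + 2
--
--         if left_child < n:
--             adj_matrix[i][left_child] = 1
--             adj_matrix[left_child][i] = 1
--
--         if right_child < n:
--             adj_matrix[i][right_child] = 1
--             adj_matrix[right_child][i] = 1
--
--     return adj_matrix
-- ===== SOURCE B (Python) =====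
-- def _edges(i, n):
--     # DFS from node i over the implicit heap tree, collecting (parent, child) edges
--     edges = []
--     left = 2 * i + 1
--     right = 2 * i + 2
--     if left < n:
--         edges.append((i, left))
--         edges += _edges(left, n)
--     if right < n:
--         edges.append((i, right))
--         edges += _edges(right, n)
--     return edges
--
--
-- def build_adj_matrix(array):
--     n = len(array)
--     adj_matrix = [[0] * n for _ in range(n)]
--     for i, j in _edges(0, n):
--         adj_matrix[i][j] = 1
--         adj_matrix[j][i] = 1
--     return adj_matrix
-- ===== Notes on version B (the rewrite author's own statement) =====
-- stated objective: alternative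
-- what changed: B replaces A's single index loop with two stages: a recursive depth-first traversal of the implicit heap tree that materialises the explicit edge list, then a pass stamping each collected edge symmetrically into the zero matrix.
import Mathlib
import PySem

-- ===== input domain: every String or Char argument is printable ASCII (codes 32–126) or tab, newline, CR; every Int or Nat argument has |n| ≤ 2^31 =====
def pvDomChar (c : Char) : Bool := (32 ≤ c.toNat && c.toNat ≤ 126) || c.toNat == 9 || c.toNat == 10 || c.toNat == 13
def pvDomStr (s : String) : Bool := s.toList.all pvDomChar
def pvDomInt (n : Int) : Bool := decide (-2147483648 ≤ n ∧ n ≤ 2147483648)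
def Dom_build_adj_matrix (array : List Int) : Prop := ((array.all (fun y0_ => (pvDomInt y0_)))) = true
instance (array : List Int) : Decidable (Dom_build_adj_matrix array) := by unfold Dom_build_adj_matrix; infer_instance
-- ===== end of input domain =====

-- B replaces A's single index loop with a recursive DFS over the implicit heap tree that
-- collects the explicit edge list, then a second pass stamping those edges into the matrix;
-- the return values are proved equal.

-- ===== PORT A =====
-- A's loop: for each parent i, write the four symmetric cells in place (List.set;
-- all Python indices here are nonnegative and the writes are guarded in range).
def build_adj_matrix (array : List Int) : List (List Int) :=
  let n := array.length
  (List.range n).foldl (fun m i =>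
    let left := 2 * i + 1
    let right := 2 * i + 2
    let m :=
      if left < n then
        let m := m.set i ((m.getD i []).set left 1)
        m.set left ((m.getD left []).set i 1)
      else m
    if right < n then
      let m := m.set i ((m.getD i []).set right 1)
      m.set right ((m.getD right []).set i 1)
    else m)
    (List.replicate n (List.replicate n 0))

-- ===== PORT B =====
-- Source B's _edges: DFS from node i collecting (parent, child) edges of the implicit heap
def edgesFrom (i n : Nat) : List (Nat × Nat) :=
  let left := 2 * i + 1
  let right := 2 * i + 2
  (if left < n then (i, left) :: edgesFrom left n else []) ++
  (if right < n then (i, right) :: edgesFrom right n else [])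
termination_by n - i
decreasing_by all_goals omega

-- Source B's main body: zero matrix, then stamp each collected edge symmetrically
def build_adj_matrix_alt (array : List Int) : List (List Int) :=
  let n := array.length
  (edgesFrom 0 n).foldl (fun m e =>
    let m := m.set e.1 ((m.getD e.1 []).set e.2 1)
    m.set e.2 ((m.getD e.2 []).set e.1 1))
    (List.replicate n (List.replicate n 0))

-- ===== PRECONDITION & SPEC =====
def Spec_build_adj_matrix (array : List Int) (out : List (List Int)) : Prop := out = build_adj_matrix_alt array
instance (array : List Int) (out : List (List Int)) : Decidable (Spec_build_adj_matrix array out) := by unfold Spec_build_adj_matrix; infer_instance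

-- ===== CLAIM (what is proved, stated in full; the proofs are below) =====
def Claim_equal_build_adj_matrix : Prop := ∀ (array : List Int), Dom_build_adj_matrix array → Spec_build_adj_matrix array (build_adj_matrix array)

-- ===== LEMMAS AND PROOFS =====

-- heap-edge predicate: j is a child of i or i is a child of j
def heapEdge (i j : Nat) : Bool :=
  j == 2 * i + 1 || j == 2 * i + 2 || i == 2 * j + 1 || i == 2 * j + 2

-- map-form matrix over range n
def mform (n : Nat) (g : Nat → Nat → Int) : List (List Int) :=
  (List.range n).map (fun i => (List.range n).map (g i))

theorem mform_congr (n : Nat) (g g' : Nat → Nat → Int)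
    (h : ∀ i j, i < n → j < n → g i j = g' i j) : mform n g = mform n g' := by
  unfold mform
  apply List.map_congr_left
  intro i hi
  simp only [List.mem_range] at hi
  apply List.map_congr_left
  intro j hj
  simp only [List.mem_range] at hj
  exact h i j hi hj

theorem set_map_range {α : Type} (n b : Nat) (g : Nat → α) (v : α) :
    ((List.range n).map g).set b v = (List.range n).map (fun j => if j = b then v else g j) := by
  apply List.ext_getElem
  · simp
  · intro i h1 h2
    simp only [List.getElem_set, List.getElem_map, List.getElem_range]
    simp only [List.length_set, List.length_map, List.length_range] at h1
    by_cases h : i = b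
    · simp [h]
    · simp [h, (Ne.symm h : ¬ b = i)]

theorem zero_mform (n : Nat) :
    List.replicate n (List.replicate n (0 : Int)) = mform n (fun _ _ => 0) := by
  unfold mform
  apply List.ext_getElem
  · simp
  · intro i h1 h2
    simp only [List.getElem_replicate, List.getElem_map]
    apply List.ext_getElem <;> simp

theorem getD_mform (n a : Nat) (ha : a < n) (g : Nat → Nat → Int) :
    (mform n g).getD a [] = (List.range n).map (g a) := by
  unfold mform
  rw [List.getD_eq_getElem?_getD, List.getElem?_map, List.getElem?_range ha]
  rfl

theorem set_entry (n a b : Nat) (ha : a < n) (g : Nat → Nat → Int) (v : Int) :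
    (mform n g).set a (((mform n g).getD a []).set b v)
      = mform n (fun i j => if i = a ∧ j = b then v else g i j) := by
  rw [getD_mform n a ha, set_map_range n b]
  unfold mform
  rw [set_map_range n a (fun i => (List.range n).map (g i))]
  apply List.map_congr_left
  intro i hi
  simp only [List.mem_range] at hi
  by_cases h : i = a
  · subst h
    simp only [if_true]
    apply List.map_congr_left
    intro j hj
    by_cases hjb : j = b <;> simp [hjb]
  · simp only [if_neg h]
    apply List.map_congr_left
    intro j hj
    simp [h]

-- after processing parents 0..k-1, cell (i,j) is 1 iff it is a heap edge whose parent (= min) is < k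
def fStage (k i j : Nat) : Int := if heapEdge i j ∧ min i j < k then 1 else 0

theorem loop_inv (n : Nat) (k : Nat) (hk : k ≤ n) :
    (List.range k).foldl (fun m i =>
      let left := 2 * i + 1
      let right := 2 * i + 2
      let m :=
        if left < n then
          let m := m.set i ((m.getD i []).set left 1)
          m.set left ((m.getD left []).set i 1)
        else m
      if right < n then
        let m := m.set i ((m.getD i []).set right 1)
        m.set right ((m.getD right []).set i 1)
      else m)
      (List.replicate n (List.replicate n 0))
    = mform n (fStage k) := by
  induction k with
  | zero =>
    simp only [List.range_zero, List.foldl_nil]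
    rw [zero_mform]
    apply mform_congr
    intro i j _ _
    simp [fStage]
  | succ k ih =>
    have hk' : k ≤ n := Nat.le_of_succ_le hk
    have hkn : k < n := Nat.lt_of_succ_le hk
    rw [List.range_succ, List.foldl_append, ih hk', List.foldl_cons, List.foldl_nil]
    simp only
    by_cases hL : 2 * k + 1 < n
    · rw [if_pos hL]
      rw [set_entry n k (2 * k + 1) hkn]
      rw [set_entry n (2 * k + 1) k hL]
      by_cases hR : 2 * k + 2 < n
      · rw [if_pos hR]
        rw [set_entry n k (2 * k + 2) hkn]
        rw [set_entry n (2 * k + 2) k hR]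
        apply mform_congr
        intro i j hi hj
        simp only [fStage, heapEdge, Bool.or_eq_true, beq_iff_eq]
        split_ifs <;> omega
      · rw [if_neg hR]
        apply mform_congr
        intro i j hi hj
        simp only [fStage, heapEdge, Bool.or_eq_true, beq_iff_eq]
        split_ifs <;> omega
    · rw [if_neg hL]
      have hR : ¬ 2 * k + 2 < n := by omega
      rw [if_neg hR]
      apply mform_congr
      intro i j hi hj
      simp only [fStage, heapEdge, Bool.or_eq_true, beq_iff_eq]
      split_ifs <;> omega

-- forward: every collected edge is an in-range (parent, child) pair
theorem mem_edgesFrom (i n a b : Nat) (h : (a, b) ∈ edgesFrom i n) :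
    b < n ∧ (b = 2 * a + 1 ∨ b = 2 * a + 2) := by
  rw [edgesFrom] at h
  simp only [List.mem_append] at h
  rcases h with h | h
  · by_cases hL : 2 * i + 1 < n
    · rw [if_pos hL] at h
      rcases List.mem_cons.mp h with h | h
      · obtain ⟨rfl, rfl⟩ := Prod.mk.injEq .. ▸ Prod.mk.inj h
        exact ⟨hL, Or.inl rfl⟩
      · exact mem_edgesFrom _ n a b h
    · rw [if_neg hL] at h; cases h
  · by_cases hR : 2 * i + 2 < n
    · rw [if_pos hR] at h
      rcases List.mem_cons.mp h with h | h
      · obtain ⟨rfl, rfl⟩ := Prod.mk.injEq .. ▸ Prod.mk.inj h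
        exact ⟨hR, Or.inr rfl⟩
      · exact mem_edgesFrom _ n a b h
    · rw [if_neg hR] at h; cases h
termination_by n - i
decreasing_by all_goals omega

-- the DFS from a child is a sublist of the DFS from its parent
theorem edgesFrom_child_subset (i c n : Nat) (hc : c < n)
    (hch : c = 2 * i + 1 ∨ c = 2 * i + 2) :
    ∀ e, e ∈ edgesFrom c n → e ∈ edgesFrom i n := by
  intro e he
  rw [edgesFrom]
  simp only [List.mem_append]
  rcases hch with rfl | rfl
  · exact Or.inl (by rw [if_pos hc]; exact List.mem_cons_of_mem _ he)
  · exact Or.inr (by rw [if_pos hc]; exact List.mem_cons_of_mem _ he)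

-- every node below n is in the DFS tree of the root
theorem edgesFrom_root (a n : Nat) (ha : a < n) :
    ∀ e, e ∈ edgesFrom a n → e ∈ edgesFrom 0 n := by
  induction a using Nat.strong_induction_on with
  | _ a ih =>
    intro e he
    rcases Nat.eq_zero_or_pos a with rfl | hpos
    · exact he
    · have hp : a = 2 * ((a - 1) / 2) + 1 ∨ a = 2 * ((a - 1) / 2) + 2 := by omega
      have hplt : (a - 1) / 2 < a := by omega
      exact ih _ hplt (by omega)
        e (edgesFrom_child_subset ((a - 1) / 2) a n ha hp e he)

-- backward: every in-range (parent, child) pair is collected from the root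
theorem child_mem_root (n a b : Nat) (hb : b < n)
    (hch : b = 2 * a + 1 ∨ b = 2 * a + 2) : (a, b) ∈ edgesFrom 0 n := by
  have ha : a < n := by omega
  apply edgesFrom_root a n ha
  rw [edgesFrom]
  simp only [List.mem_append]
  rcases hch with rfl | rfl
  · exact Or.inl (by rw [if_pos hb]; exact List.mem_cons_self)
  · exact Or.inr (by rw [if_pos hb]; exact List.mem_cons_self)

-- stamping a list of in-range edges onto a map-form matrix
theorem stamp_fold (n : Nat) (E : List (Nat × Nat))
    (hE : ∀ e ∈ E, e.1 < n ∧ e.2 < n) (g : Nat → Nat → Int) :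
    E.foldl (fun m e =>
      let m := m.set e.1 ((m.getD e.1 []).set e.2 1)
      m.set e.2 ((m.getD e.2 []).set e.1 1)) (mform n g)
    = mform n (fun p q => if (p, q) ∈ E ∨ (q, p) ∈ E then 1 else g p q) := by
  induction E generalizing g with
  | nil =>
    simp only [List.foldl_nil]
    apply mform_congr
    intro p q _ _
    simp
  | cons e E ih =>
    obtain ⟨a, b⟩ := e
    have ha : a < n := (hE (a, b) List.mem_cons_self).1
    have hb : b < n := (hE (a, b) List.mem_cons_self).2
    rw [List.foldl_cons]
    simp only
    rw [set_entry n a b ha, set_entry n b a hb,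
      ih (fun e he => hE e (List.mem_cons_of_mem _ he))]
    apply mform_congr
    intro p q hp hq
    simp only [List.mem_cons, Prod.mk.injEq]
    split_ifs <;> tauto

theorem final_eq (array : List Int) :
    build_adj_matrix array = build_adj_matrix_alt array := by
  simp only [build_adj_matrix, build_adj_matrix_alt]
  rw [loop_inv array.length array.length (le_refl _), zero_mform,
    stamp_fold array.length (edgesFrom 0 array.length)
      (by
        intro e he
        obtain ⟨a, b⟩ := e
        have := mem_edgesFrom 0 array.length a b he
        exact ⟨by omega, this.1⟩)]
  apply mform_congr
  intro i j hi hj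
  simp only [fStage]
  by_cases h1 : (i, j) ∈ edgesFrom 0 array.length
  · have := mem_edgesFrom 0 array.length i j h1
    rw [if_pos (by simp [heapEdge]; omega), if_pos (Or.inl h1)]
  · by_cases h2 : (j, i) ∈ edgesFrom 0 array.length
    · have := mem_edgesFrom 0 array.length j i h2
      rw [if_pos (by simp [heapEdge]; omega), if_pos (Or.inr h2)]
    · rw [if_neg, if_neg (by tauto)]
      rintro ⟨he, -⟩
      simp only [heapEdge, Bool.or_eq_true, beq_iff_eq] at he
      rcases he with ((h | h) | h) | h
      · exact h1 (child_mem_root _ i j hj (Or.inl h))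
      · exact h1 (child_mem_root _ i j hj (Or.inr h))
      · exact h2 (child_mem_root _ j i hi (Or.inl h))
      · exact h2 (child_mem_root _ j i hi (Or.inr h))

-- ===== VERDICT (by name: the statement is the Claim_ definition above) =====
theorem build_adj_matrix_spec : Claim_equal_build_adj_matrix := by
  intro array _
  unfold Spec_build_adj_matrix
  exact final_eq array
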